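-- pv_equiv track=rewrite | github.com/Himaja63/cp_problems | 01-matrixmultiply-Python/matrixmultiply.py | isSquareMatrix
-- ===== SOURCE A (Python) =====
-- def isSquareMatrix(m):
--     flag = 0
--     for i in range(len(m)):
--         for j in range(len(m)):
--             if (i != j):
--                 if(len(m[i]) != len(m[j])):
--                     flag = 1
--                     break
--     if flag == 1:
--         return False
--     else:
--         return True
-- ===== SOURCE B (Python) =====
-- def isSquareMatrix(m):
--     lengths = {len(row) for row in m}
--     return len(lengths) <= 1
-- ===== Notes on version B (the rewrite author's own statement) =====
-- stated objective: simpler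
-- what changed: Replaces A's nested pairwise index comparison with a break flag by a single pass collecting the set of distinct row lengths followed by a cardinality test.
import Mathlib
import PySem

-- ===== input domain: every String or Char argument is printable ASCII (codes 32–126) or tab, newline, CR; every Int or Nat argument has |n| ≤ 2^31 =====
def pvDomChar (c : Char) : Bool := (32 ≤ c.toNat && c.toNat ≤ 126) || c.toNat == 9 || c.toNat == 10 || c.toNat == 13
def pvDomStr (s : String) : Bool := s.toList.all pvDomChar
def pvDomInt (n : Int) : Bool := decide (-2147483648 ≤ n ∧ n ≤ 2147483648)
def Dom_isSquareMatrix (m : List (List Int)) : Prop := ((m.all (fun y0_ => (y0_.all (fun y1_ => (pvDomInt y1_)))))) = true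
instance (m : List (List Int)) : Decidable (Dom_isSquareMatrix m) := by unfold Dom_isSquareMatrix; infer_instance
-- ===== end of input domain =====

-- B replaces A's nested pairwise comparison loop by one pass collecting the set of
-- distinct row lengths and a cardinality test (objective: simpler).

-- ===== PORT A =====
-- inner 'for j in range(len(m))' loop with its 'break'; returns the flag value
def pvInnerA (m : List (List Int)) (i : Int) (flag : Int) : List Int → Int
  | [] => flag
  | j :: js =>
    if i ≠ j then
      if (PySem.List.pyGetD m i []).length ≠ (PySem.List.pyGetD m j []).length then
        1  -- flag = 1; break
      else pvInnerA m i flag js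
    else pvInnerA m i flag js

def isSquareMatrix (m : List (List Int)) : Bool :=
  let flag : Int :=
    (PySem.List.pyRange 0 (m.length : Int) 1).foldl
      (fun flag i => pvInnerA m i flag (PySem.List.pyRange 0 (m.length : Int) 1)) 0
  if flag = 1 then false else true

-- ===== PORT B =====
def isSquareMatrix_alt (m : List (List Int)) : Bool :=
  let lengths : PySem.Set Int := PySem.Set.ofList (m.map (fun row => (row.length : Int)))
  decide (PySem.Set.len lengths ≤ 1)

-- ===== PRECONDITION & SPEC =====
def Spec_isSquareMatrix (m : List (List Int)) (out : Bool) : Prop := out = isSquareMatrix_alt m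
instance (m : List (List Int)) (out : Bool) : Decidable (Spec_isSquareMatrix m out) := by unfold Spec_isSquareMatrix; infer_instance

-- ===== CLAIM (what is proved, stated in full; the proofs are below) =====
def Claim_equal_isSquareMatrix : Prop := ∀ (m : List (List Int)), Dom_isSquareMatrix m → Spec_isSquareMatrix m (isSquareMatrix m)

-- ===== LEMMAS AND PROOFS =====

-- 'a bad pair of indices': the condition under which A sets its flag
abbrev pvBad (m : List (List Int)) (i j : Int) : Prop :=
  i ≠ j ∧ (PySem.List.pyGetD m i []).length ≠ (PySem.List.pyGetD m j []).length

theorem pvInnerA_eq (m : List (List Int)) (i : Int) (flag : Int) (js : List Int) :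
    pvInnerA m i flag js = if ∃ j ∈ js, pvBad m i j then 1 else flag := by
  induction js with
  | nil => simp [pvInnerA]
  | cons j js ih =>
    by_cases h1 : i ≠ j
    · by_cases h2 : (PySem.List.pyGetD m i []).length ≠ (PySem.List.pyGetD m j []).length
      · simp [pvInnerA, h1, h2, pvBad]
      · simp only [pvInnerA, if_pos h1, if_neg h2, ih]
        have : ¬ pvBad m i j := fun hb => h2 hb.2
        simp [this]
    · simp only [pvInnerA, if_neg h1, ih]
      have : ¬ pvBad m i j := fun hb => h1 hb.1
      simp [this]

theorem pvFoldl_eq (m : List (List Int)) (l jset : List Int) (f0 : Int) :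
    l.foldl (fun flag i => pvInnerA m i flag jset) f0 =
      if ∃ i ∈ l, ∃ j ∈ jset, pvBad m i j then 1 else f0 := by
  induction l generalizing f0 with
  | nil => simp
  | cons a l ih =>
    rw [List.foldl_cons, pvInnerA_eq, ih]
    by_cases ha : ∃ j ∈ jset, pvBad m a j
    · simp [ha]
    · by_cases hl : ∃ i ∈ l, ∃ j ∈ jset, pvBad m i j <;> simp [ha, hl]

-- the common pivot: all row lengths equal
theorem pvA_iff (m : List (List Int)) :
    isSquareMatrix m = true ↔
      ∀ x ∈ m.map (fun row => (row.length : Int)), ∀ y ∈ m.map (fun row => (row.length : Int)), x = y := by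
  unfold isSquareMatrix
  rw [pvFoldl_eq]
  constructor
  · intro h x hx y hy
    by_contra hxy
    obtain ⟨r, hr, hxr⟩ := List.mem_map.mp hx
    obtain ⟨s, hs, hys⟩ := List.mem_map.mp hy
    obtain ⟨a, ha, har⟩ := List.getElem_of_mem hr
    obtain ⟨b, hb, hbs⟩ := List.getElem_of_mem hs
    have hab : (a : Int) ≠ (b : Int) := by
      intro hEq
      apply hxy
      have : a = b := by exact_mod_cast hEq
      subst this; rw [← hxr, ← hys, ← har, ← hbs]
    have hbad : ∃ i ∈ PySem.List.pyRange 0 (m.length : Int) 1,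
        ∃ j ∈ PySem.List.pyRange 0 (m.length : Int) 1, pvBad m i j := by
      refine ⟨(a : Int), ?_, (b : Int), ?_, hab, ?_⟩
      · exact PySem.List.mem_pyRange_one.mpr ⟨by positivity, by exact_mod_cast ha⟩
      · exact PySem.List.mem_pyRange_one.mpr ⟨by positivity, by exact_mod_cast hb⟩
      · rw [PySem.List.pyGetD_eq_getElem _ _ (by positivity) (by exact_mod_cast ha),
            PySem.List.pyGetD_eq_getElem _ _ (by positivity) (by exact_mod_cast hb)]
        simp only [Int.toNat_natCast]
        rw [har, hbs]
        intro hlen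
        apply hxy
        rw [← hxr, ← hys, hlen]
    rw [if_pos hbad] at h
    norm_num at h
  · intro h
    have : ¬ ∃ i ∈ PySem.List.pyRange 0 (m.length : Int) 1,
        ∃ j ∈ PySem.List.pyRange 0 (m.length : Int) 1, pvBad m i j := by
      rintro ⟨i, hi, j, hj, hij, hlen⟩
      obtain ⟨hi0, hi1⟩ := PySem.List.mem_pyRange_one.mp hi
      obtain ⟨hj0, hj1⟩ := PySem.List.mem_pyRange_one.mp hj
      apply hlen
      rw [PySem.List.pyGetD_eq_getElem _ _ hi0 hi1, PySem.List.pyGetD_eq_getElem _ _ hj0 hj1]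
      have hx : ((m[i.toNat]'(by omega)).length : Int) ∈ m.map (fun row => (row.length : Int)) :=
        List.mem_map.mpr ⟨_, List.getElem_mem _, rfl⟩
      have hy : ((m[j.toNat]'(by omega)).length : Int) ∈ m.map (fun row => (row.length : Int)) :=
        List.mem_map.mpr ⟨_, List.getElem_mem _, rfl⟩
      exact_mod_cast h _ hx _ hy
    rw [if_neg this]
    norm_num

theorem pvB_iff (m : List (List Int)) :
    isSquareMatrix_alt m = true ↔
      ∀ x ∈ m.map (fun row => (row.length : Int)), ∀ y ∈ m.map (fun row => (row.length : Int)), x = y := by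
  unfold isSquareMatrix_alt
  set L := m.map (fun row => (row.length : Int)) with hL
  simp only [decide_eq_true_eq, PySem.Set.len]
  constructor
  · intro h x hx y hy
    have hx' := (PySem.Set.mem_ofList L x).mpr hx
    have hy' := (PySem.Set.mem_ofList L y).mpr hy
    match hS : PySem.Set.ofList L with
    | [] => rw [hS] at hx'; simp at hx'
    | [a] =>
      rw [hS] at hx' hy'
      simp at hx' hy'; rw [hx', hy']
    | a :: b :: t => rw [hS] at h; simp at h; omega
  · intro h
    by_contra hlen
    have h2 : 2 ≤ (PySem.Set.ofList L).length := by omega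
    match hS : PySem.Set.ofList L with
    | [] => rw [hS] at h2; simp at h2
    | [a] => rw [hS] at h2; simp at h2
    | a :: b :: t =>
      have hnd := PySem.Set.nodup_ofList L
      rw [hS] at hnd
      have hab : a ≠ b := by
        intro hEq
        exact (List.nodup_cons.mp hnd).1 (by simp [hEq])
      have haL : a ∈ L := (PySem.Set.mem_ofList L a).mp (by rw [hS]; simp)
      have hbL : b ∈ L := (PySem.Set.mem_ofList L b).mp (by rw [hS]; simp)
      exact hab (h a haL b hbL)

-- ===== VERDICT (by name: the statement is the Claim_ definition above) =====
theorem isSquareMatrix_spec : Claim_equal_isSquareMatrix := by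
  intro m _
  unfold Spec_isSquareMatrix
  rw [Bool.eq_iff_iff, pvA_iff, pvB_iff]
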